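-- pv_equiv track=rewrite | github.com/anuragprat1k/fairo | droidlet/lowlevel/minecraft/small_scenes_with_shapes.py | build_base_world
-- ===== SOURCE A (Python) =====
-- def red():
--     return (35, 14)
--
-- def white():
--     return (35, 0)
--
-- def build_base_world(sl, h, g, fence=False):
--     W = []
--     for i in range(sl):
--         for j in range(g):
--             for k in range(sl):
--                 if (i == 0 or i == sl - 1 or k == 0 or k == sl - 1) and j == g - 1 and fence:
--                     idm = red()
--                 else:
--                     idm = white()
--                 W.append(((i, j, k), idm))
--     return W
-- ===== SOURCE B (Python) =====
-- def red():
--     return (35, 14)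
--
-- def white():
--     return (35, 0)
--
-- def build_base_world(sl, h, g, fence=False):
--     # uniform white fill, then paint the top-layer border cells red in place
--     W = [((i, j, k), white()) for i in range(sl) for j in range(g) for k in range(sl)]
--     if fence and g > 0:
--         j = g - 1
--         for i in range(sl):
--             ks = range(sl) if (i == 0 or i == sl - 1) else (0, sl - 1)
--             for k in ks:
--                 W[i * g * sl + j * sl + k] = ((i, j, k), red())
--     return W
-- ===== Notes on version B (the rewrite author's own statement) =====
-- stated objective: alternative
-- what changed: A decides the color of every cell inside a triple nested loop; B first builds the whole grid white with one comprehension and then overwrites only the top-layer border cells to red by positional index i*g*sl + (g-1)*sl + k.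
import Mathlib
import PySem

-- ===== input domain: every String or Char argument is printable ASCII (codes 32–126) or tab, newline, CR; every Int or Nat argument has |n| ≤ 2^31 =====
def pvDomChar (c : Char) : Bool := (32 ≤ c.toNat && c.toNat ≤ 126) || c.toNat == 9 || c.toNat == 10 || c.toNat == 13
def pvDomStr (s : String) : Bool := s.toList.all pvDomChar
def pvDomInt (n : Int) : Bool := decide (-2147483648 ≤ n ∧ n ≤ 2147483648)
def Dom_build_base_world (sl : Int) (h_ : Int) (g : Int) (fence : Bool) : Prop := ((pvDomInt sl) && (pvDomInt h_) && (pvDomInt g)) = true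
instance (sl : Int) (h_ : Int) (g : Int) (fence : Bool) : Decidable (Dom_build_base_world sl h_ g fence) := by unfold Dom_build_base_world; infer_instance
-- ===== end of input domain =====

-- B replaces A's per-cell color branch by a uniform white fill followed by an
-- in-place red repaint of the top-layer border cells (alternative decomposition, same cost).


-- ===== PORT A =====
def pvRed : Int × Int := (35, 14)       -- red()

def pvWhite : Int × Int := (35, 0)      -- white()

def build_base_world (sl : Int) (h_ : Int) (g : Int) (fence : Bool) : List ((Int × Int × Int) × (Int × Int)) :=
  (PySem.List.pyRange 0 sl 1).foldl (fun W i =>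
    (PySem.List.pyRange 0 g 1).foldl (fun W j =>
      (PySem.List.pyRange 0 sl 1).foldl (fun W k =>
        W ++ [((i, j, k),
          if (i == 0 || i == sl - 1 || k == 0 || k == sl - 1) && j == g - 1 && fence
          then pvRed else pvWhite)]) W) W) []

-- ===== PORT B =====
def build_base_world_alt (sl : Int) (h_ : Int) (g : Int) (fence : Bool) : List ((Int × Int × Int) × (Int × Int)) :=
  let W := (PySem.List.pyRange 0 sl 1).flatMap (fun i =>
             (PySem.List.pyRange 0 g 1).flatMap (fun j =>
               (PySem.List.pyRange 0 sl 1).map (fun k => ((i, j, k), pvWhite))))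
  if fence && decide (0 < g) then
    let j := g - 1
    (PySem.List.pyRange 0 sl 1).foldl (fun W i =>
      let ks := if i == 0 || i == sl - 1 then PySem.List.pyRange 0 sl 1 else [0, sl - 1]
      ks.foldl (fun W k =>
        PySem.List.pySetD W (i * g * sl + j * sl + k) ((i, j, k), pvRed)) W) W
  else W

-- ===== PRECONDITION & SPEC =====
def Spec_build_base_world (sl : Int) (h_ : Int) (g : Int) (fence : Bool) (out : List ((Int × Int × Int) × (Int × Int))) : Prop := out = build_base_world_alt sl h_ g fence
instance (sl : Int) (h_ : Int) (g : Int) (fence : Bool) (out : List ((Int × Int × Int) × (Int × Int))) : Decidable (Spec_build_base_world sl h_ g fence out) := by unfold Spec_build_base_world; infer_instance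

-- ===== CLAIM (what is proved, stated in full; the proofs are below) =====
def Claim_equal_build_base_world : Prop := ∀ (sl : Int) (h_ : Int) (g : Int) (fence : Bool), Dom_build_base_world sl h_ g fence → Spec_build_base_world sl h_ g fence (build_base_world sl h_ g fence)

-- ===== LEMMAS AND PROOFS =====

-- the color A assigns to cell (i, j, k)
def pvCell (sl g : Int) (fence : Bool) (i j k : Int) : (Int × Int × Int) × (Int × Int) :=
  ((i, j, k),
    if (i == 0 || i == sl - 1 || k == 0 || k == sl - 1) && j == g - 1 && fence
    then pvRed else pvWhite)

-- A is the canonical flatMap over the three ranges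
lemma pvA_canon (sl h_ g : Int) (fence : Bool) :
    build_base_world sl h_ g fence
    = (PySem.List.pyRange 0 sl 1).flatMap (fun i =>
        (PySem.List.pyRange 0 g 1).flatMap (fun j =>
          (PySem.List.pyRange 0 sl 1).map (fun k => pvCell sl g fence i j k))) := by
  unfold build_base_world pvCell
  simp only [PySem.List.foldl_append_singleton_eq_map, PySem.List.foldl_append_eq_flatMap,
    List.nil_append]

-- flatten one level: a product range as a flat range with div/mod decoding
lemma pvRangeMulFlat {α : Type} (a b : Nat) (f : Nat → Nat → α) :
    (List.range (a * b)).map (fun t => f (t / b) (t % b))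
    = (List.range a).flatMap (fun i => (List.range b).map (f i)) := by
  induction a with
  | zero => simp
  | succ a ih =>
    rw [Nat.succ_mul, List.range_add, List.range_succ, List.map_append, ih, List.flatMap_append]
    congr 1
    · simp only [List.flatMap_cons, List.flatMap_nil, List.append_nil]
      rw [List.map_map]
      refine List.map_congr_left ?_
      intro r hr
      have hrb : r < b := List.mem_range.mp hr
      have hb : 0 < b := by omega
      simp only [Function.comp_apply]
      rw [Nat.mul_comm a b, Nat.mul_add_div hb, Nat.mul_add_mod,
        Nat.div_eq_of_lt hrb, Nat.mod_eq_of_lt hrb, Nat.add_zero]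

-- flatten both levels
lemma pvRanges3 {α : Type} (n G : Nat) (f : Nat → Nat → Nat → α) :
    (List.range n).flatMap (fun i => (List.range G).flatMap (fun j => (List.range n).map (f i j)))
    = (List.range (n * (G * n))).map (fun t => f (t / (G * n)) (t % (G * n) / n) (t % n)) := by
  have h1 : ∀ i : Nat,
      (List.range G).flatMap (fun j => (List.range n).map (f i j))
      = (List.range (G * n)).map (fun r => f i (r / n) (r % n)) :=
    fun i => (pvRangeMulFlat G n (fun j k => f i j k)).symm
  have h2 := pvRangeMulFlat n (G * n) (fun i r => f i (r / n) (r % n))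
  simp only [h1]
  rw [← h2]
  refine List.map_congr_left ?_
  intro t ht
  have hmm : t % (G * n) % n = t % n := Nat.mod_mod_of_dvd t ⟨G, Nat.mul_comm G n⟩
  rw [hmm]

-- the value B writes at flat position t during the repaint pass
def pvVal (g : Int) (n G : Nat) (t : Nat) : (Int × Int × Int) × (Int × Int) :=
  (((t / (G * n) : Nat), g - 1, (t % n : Nat)), pvRed)

-- the k-list B repaints in row i, and the flat positions it touches
def pvKs (sl : Int) (i : Int) : List Int :=
  if i == 0 || i == sl - 1 then PySem.List.pyRange 0 sl 1 else [0, sl - 1]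

def pvHit (sl g : Int) (i : Int) (t : Nat) : Bool :=
  (pvKs sl i).any (fun k => (i * g * sl + (g - 1) * sl + k).toNat == t)

lemma pvSetMapRange {α : Type} (N m : Nat) (_hm : m < N) (F : Nat → α) (v : α) :
    ((List.range N).map F).set m v = (List.range N).map (fun t => if t = m then v else F t) := by
  refine List.ext_getElem (by simp) ?_
  intro i h1 h2
  simp only [List.getElem_set, List.getElem_map, List.getElem_range]
  rcases eq_or_ne m i with h | h
  · simp [h]
  · rw [if_neg h, if_neg (fun hh => h hh.symm)]

lemma pvFoldlSet {α β : Type} (N : Nat) (V : Nat → α) (enc : β → Int) :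
    ∀ (ks : List β) (F : Nat → α), (∀ k ∈ ks, 0 ≤ enc k ∧ (enc k).toNat < N) →
    ks.foldl (fun W k => PySem.List.pySetD W (enc k) (V (enc k).toNat)) ((List.range N).map F)
    = (List.range N).map (fun t => if ks.any (fun k => (enc k).toNat == t) then V t else F t) := by
  intro ks
  induction ks with
  | nil => intro F _; simp
  | cons k ks ih =>
    intro F he
    obtain ⟨h0, hN⟩ := he k (by simp)
    rw [List.foldl_cons, PySem.List.pySetD_of_nonneg _ _ h0, pvSetMapRange N _ hN F,
        ih _ (fun k' hm => he k' (by simp [hm]))]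
    refine List.map_congr_left ?_
    intro t _
    by_cases h1 : ks.any (fun k' => (enc k').toNat == t)
    · simp [h1]
    · by_cases h2 : t = (enc k).toNat
      · simp [h2]
      · have h2' : ¬ (enc k).toNat = t := fun hh => h2 hh.symm
        simp [h1, h2, h2']

-- decoding the flat position a*(G*n) + b*n + c
lemma pvDecode (n G a b c : Nat) (hn : 0 < n) (ha : a < n) (hb : b < G) (hc : c < n) :
    (a * (G * n) + b * n + c) / (G * n) = a ∧ (a * (G * n) + b * n + c) % (G * n) / n = b ∧
    (a * (G * n) + b * n + c) % n = c ∧ a * (G * n) + b * n + c < n * (G * n) := by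
  have hGn : 0 < G * n := Nat.mul_pos (by omega) hn
  have hr : b * n + c < G * n := by
    have h1 : b * n + n = (b + 1) * n := by ring
    have h2 : (b + 1) * n ≤ G * n := Nat.mul_le_mul_right n (by omega)
    omega
  refine ⟨?_, ?_, ?_, ?_⟩
  · rw [Nat.add_assoc, Nat.mul_comm a (G * n), Nat.mul_add_div hGn, Nat.div_eq_of_lt hr,
      Nat.add_zero]
  · rw [Nat.add_assoc, Nat.mul_comm a (G * n), Nat.mul_add_mod, Nat.mod_eq_of_lt hr,
      Nat.mul_comm b n, Nat.mul_add_div hn, Nat.div_eq_of_lt hc, Nat.add_zero]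
  · have h : a * (G * n) + b * n + c = n * (a * G + b) + c := by ring
    rw [h, Nat.mul_add_mod, Nat.mod_eq_of_lt hc]
  · have h1 : a * (G * n) + (G * n) = (a + 1) * (G * n) := by ring
    have h2 : (a + 1) * (G * n) ≤ n * (G * n) := Nat.mul_le_mul_right _ (by omega)
    omega

lemma pvSplit (n G t : Nat) (hn : 0 < n) (hG : 0 < G) (ht : t < n * (G * n)) :
    t / (G * n) < n ∧ t % (G * n) / n < G ∧ t % n < n ∧
    t = t / (G * n) * (G * n) + t % (G * n) / n * n + t % n := by
  have hGn : 0 < G * n := Nat.mul_pos hG hn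
  have e1 : G * n * (t / (G * n)) + t % (G * n) = t := Nat.div_add_mod t (G * n)
  have e1' : t / (G * n) * (G * n) = G * n * (t / (G * n)) := Nat.mul_comm _ _
  have e2 : n * (t % (G * n) / n) + t % (G * n) % n = t % (G * n) := Nat.div_add_mod _ n
  have e2' : t % (G * n) / n * n = n * (t % (G * n) / n) := Nat.mul_comm _ _
  have e3 : t % (G * n) % n = t % n := Nat.mod_mod_of_dvd t ⟨G, Nat.mul_comm G n⟩
  refine ⟨?_, ?_, Nat.mod_lt _ hn, by omega⟩
  · exact (Nat.div_lt_iff_lt_mul hGn).mpr (by omega)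
  · exact (Nat.div_lt_iff_lt_mul hn).mpr (Nat.mod_lt _ hGn)

-- the repaint address, as a Nat
lemma pvAddr (n G : Nat) (hG : 0 < G) (i k : Int) (hi0 : 0 ≤ i) (hk0 : 0 ≤ k) :
    0 ≤ i * (G : Int) * (n : Int) + ((G : Int) - 1) * (n : Int) + k ∧
    (i * (G : Int) * (n : Int) + ((G : Int) - 1) * (n : Int) + k).toNat
      = i.toNat * (G * n) + (G - 1) * n + k.toNat := by
  obtain ⟨a, rfl⟩ : ∃ a : Nat, i = (a : Int) := ⟨i.toNat, (Int.toNat_of_nonneg hi0).symm⟩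
  obtain ⟨c, rfl⟩ : ∃ c : Nat, k = (c : Int) := ⟨k.toNat, (Int.toNat_of_nonneg hk0).symm⟩
  have hcast : ((a * (G * n) + (G - 1) * n + c : Nat) : Int)
      = (a : Int) * (G : Int) * (n : Int) + ((G : Int) - 1) * (n : Int) + (c : Int) := by
    push_cast [Nat.cast_sub (by omega : 1 ≤ G)]
    ring
  constructor
  · exact hcast ▸ Int.natCast_nonneg _
  · rw [← hcast, Int.toNat_natCast, Int.toNat_natCast, Int.toNat_natCast]

-- one repaint row, evaluated on the canonical map
lemma pvRow (sl g : Int) (n G : Nat) (hsl : sl = (n : Int)) (hg : g = (G : Int))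
    (hn : 0 < n) (hG : 0 < G) (i : Int) (hi0 : 0 ≤ i) (hi1 : i < sl)
    (ks : List Int) (hk : ∀ k ∈ ks, 0 ≤ k ∧ k < sl)
    (F : Nat → (Int × Int × Int) × (Int × Int)) :
    ks.foldl (fun W k =>
        PySem.List.pySetD W (i * g * sl + (g - 1) * sl + k) ((i, g - 1, k), pvRed))
      ((List.range (n * (G * n))).map F)
    = (List.range (n * (G * n))).map (fun t =>
        if ks.any (fun k => (i * g * sl + (g - 1) * sl + k).toNat == t) then pvVal g n G t
        else F t) := by
  subst hsl hg
  rw [PySem.List.foldl_congr_mem ks _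
      (fun W k => PySem.List.pySetD W ((fun k => i * (G : Int) * (n : Int)
          + ((G : Int) - 1) * (n : Int) + k) k)
        (pvVal (G : Int) n G (((fun k => i * (G : Int) * (n : Int)
          + ((G : Int) - 1) * (n : Int) + k) k).toNat))) _ ?_]
  · exact pvFoldlSet (n * (G * n)) (pvVal (G : Int) n G)
      (fun k => i * (G : Int) * (n : Int) + ((G : Int) - 1) * (n : Int) + k) ks F
      (fun k hkmem => by
        obtain ⟨hk0, hk1⟩ := hk k hkmem
        obtain ⟨hnn, heq⟩ := pvAddr n G hG i k hi0 hk0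
        have hia : i.toNat < n := by omega
        have hka : k.toNat < n := by omega
        obtain ⟨_, _, _, hlt⟩ := pvDecode n G i.toNat (G - 1) k.toNat hn hia (by omega) hka
        refine ⟨hnn, ?_⟩
        show (i * (G : Int) * (n : Int) + ((G : Int) - 1) * (n : Int) + k).toNat < n * (G * n)
        rw [heq]; exact hlt)
  · intro W k hkmem
    obtain ⟨hk0, hk1⟩ := hk k hkmem
    obtain ⟨hnn, heq⟩ := pvAddr n G hG i k hi0 hk0
    have hia : i.toNat < n := by omega
    have hka : k.toNat < n := by omega
    obtain ⟨d1, d2, d3, _⟩ := pvDecode n G i.toNat (G - 1) k.toNat hn hia (by omega) hka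
    congr 1
    unfold pvVal
    rw [heq, d1, d3, Int.toNat_of_nonneg hi0, Int.toNat_of_nonneg hk0]

-- the whole repaint pass, evaluated on the canonical map
lemma pvPatch (sl g : Int) (n G : Nat) (hsl : sl = (n : Int)) (hg : g = (G : Int))
    (hn : 0 < n) (hG : 0 < G) :
    ∀ (l : List Int), (∀ i ∈ l, 0 ≤ i ∧ i < sl) →
    ∀ (F : Nat → (Int × Int × Int) × (Int × Int)),
    l.foldl (fun W i =>
        (pvKs sl i).foldl (fun W k =>
          PySem.List.pySetD W (i * g * sl + (g - 1) * sl + k) ((i, g - 1, k), pvRed)) W)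
      ((List.range (n * (G * n))).map F)
    = (List.range (n * (G * n))).map (fun t =>
        if l.any (fun i => pvHit sl g i t) then pvVal g n G t else F t) := by
  intro l
  induction l with
  | nil => intro _ F; simp
  | cons i l ih =>
    intro hl F
    obtain ⟨hi0, hi1⟩ := hl i (by simp)
    have hks : ∀ k ∈ pvKs sl i, 0 ≤ k ∧ k < sl := by
      intro k hk
      unfold pvKs at hk
      by_cases hb : (i == 0 || i == sl - 1) = true
      · rw [if_pos hb] at hk
        exact PySem.List.mem_pyRange_one.mp hk
      · rw [if_neg hb] at hk
        have hn' : (1 : Int) ≤ (n : Int) := by exact_mod_cast hn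
        simp at hk
        rcases hk with rfl | rfl
        · exact ⟨le_refl 0, by omega⟩
        · exact ⟨by omega, by omega⟩
    rw [List.foldl_cons, pvRow sl g n G hsl hg hn hG i hi0 hi1 (pvKs sl i) hks F,
        ih (fun i' h => hl i' (by simp [h])) _]
    refine List.map_congr_left ?_
    intro t _
    by_cases h1 : l.any (fun i' => pvHit sl g i' t)
    · simp [h1]
    · by_cases h2 : pvHit sl g i t
      · unfold pvHit at h2
        simp [h2, pvHit]
      · unfold pvHit at h2
        simp only [Bool.not_eq_true] at h2
        simp [h2, pvHit]

-- the nested ranges as one flat range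
lemma pvCanonNat {α : Type} (n G : Nat) (f : Int → Int → Int → α) :
    (PySem.List.pyRange 0 (n : Int) 1).flatMap (fun i =>
      (PySem.List.pyRange 0 (G : Int) 1).flatMap (fun j =>
        (PySem.List.pyRange 0 (n : Int) 1).map (fun k => f i j k)))
    = (List.range (n * (G * n))).map (fun t =>
        f ((t / (G * n) : Nat)) ((t % (G * n) / n : Nat)) ((t % n : Nat))) := by
  rw [PySem.List.pyRange_zero_natCast n, PySem.List.pyRange_zero_natCast G]
  simp only [List.flatMap_map, List.map_map]
  exact pvRanges3 n G (fun a b c => f (a : Int) (b : Int) (c : Int))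

-- pointwise agreement of the painted canonical map with A's per-cell decision (fence on)
lemma pvPoint (n G : Nat) (hn : 0 < n) (hG : 0 < G) (t : Nat) (ht : t < n * (G * n)) :
    (if (PySem.List.pyRange 0 (n : Int) 1).any (fun i => pvHit (n : Int) (G : Int) i t)
      then pvVal (G : Int) n G t
      else ((((t / (G * n) : Nat) : Int), ((t % (G * n) / n : Nat) : Int),
             ((t % n : Nat) : Int)), pvWhite))
    = pvCell (n : Int) (G : Int) true ((t / (G * n) : Nat)) ((t % (G * n) / n : Nat))
        ((t % n : Nat)) := by
  obtain ⟨hb1, hb2, hb3, hsum⟩ := pvSplit n G t hn hG ht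
  have hchar :
      ((PySem.List.pyRange 0 (n : Int) 1).any (fun i => pvHit (n : Int) (G : Int) i t) = true)
      ↔ (t % (G * n) / n = G - 1 ∧
          (t / (G * n) = 0 ∨ t / (G * n) = n - 1 ∨ t % n = 0 ∨ t % n = n - 1)) := by
    constructor
    · intro h
      obtain ⟨i, hmem, hhit⟩ := List.any_eq_true.mp h
      obtain ⟨hi0, hi1⟩ := PySem.List.mem_pyRange_one.mp hmem
      unfold pvHit at hhit
      obtain ⟨k, hkmem, hkeq⟩ := List.any_eq_true.mp hhit
      have hkeq' : (i * (G : Int) * (n : Int) + ((G : Int) - 1) * (n : Int) + k).toNat = t :=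
        by exact beq_iff_eq.mp hkeq
      have hk01 : 0 ≤ k ∧ k < (n : Int) := by
        unfold pvKs at hkmem
        by_cases hb : (i == 0 || i == (n : Int) - 1) = true
        · rw [if_pos hb] at hkmem
          exact PySem.List.mem_pyRange_one.mp hkmem
        · rw [if_neg hb] at hkmem
          have hn' : (1 : Int) ≤ (n : Int) := by exact_mod_cast hn
          simp at hkmem
          rcases hkmem with rfl | rfl
          · exact ⟨le_refl 0, by omega⟩
          · exact ⟨by omega, by omega⟩
      obtain ⟨hk0, hk1⟩ := hk01
      obtain ⟨_, heq⟩ := pvAddr n G hG i k hi0 hk0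
      have hia : i.toNat < n := by omega
      have hka : k.toNat < n := by omega
      obtain ⟨d1, d2, d3, _⟩ := pvDecode n G i.toNat (G - 1) k.toNat hn hia (by omega) hka
      rw [← hkeq', heq, d1, d2, d3]
      refine ⟨rfl, ?_⟩
      unfold pvKs at hkmem
      by_cases hb : (i == 0 || i == (n : Int) - 1) = true
      · simp only [Bool.or_eq_true, beq_iff_eq] at hb
        rcases hb with rfl | rfl
        · exact Or.inl (by omega)
        · exact Or.inr (Or.inl (by omega))
      · rw [if_neg hb] at hkmem
        simp at hkmem
        rcases hkmem with rfl | rfl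
        · exact Or.inr (Or.inr (Or.inl (by omega)))
        · exact Or.inr (Or.inr (Or.inr (by omega)))
    · rintro ⟨hbeq, hd⟩
      rw [List.any_eq_true]
      refine ⟨((t / (G * n) : Nat) : Int), ?_, ?_⟩
      · rw [PySem.List.mem_pyRange_one]
        exact ⟨Int.natCast_nonneg _, by exact_mod_cast hb1⟩
      · unfold pvHit
        rw [List.any_eq_true]
        refine ⟨((t % n : Nat) : Int), ?_, ?_⟩
        · unfold pvKs
          by_cases hb : (((t / (G * n) : Nat) : Int) == 0 ||
              ((t / (G * n) : Nat) : Int) == (n : Int) - 1) = true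
          · rw [if_pos hb, PySem.List.mem_pyRange_one]
            exact ⟨Int.natCast_nonneg _, by exact_mod_cast hb3⟩
          · rw [if_neg hb]
            simp only [Bool.or_eq_true, beq_iff_eq, not_or] at hb
            obtain ⟨ha0, ha1⟩ := hb
            have hc : t % n = 0 ∨ t % n = n - 1 := by
              rcases hd with h | h | h | h
              · exact absurd (by exact_mod_cast congrArg (fun x : Nat => (x : Int)) h) ha0
              · exfalso; apply ha1; omega
              · exact Or.inl h
              · exact Or.inr h
            rcases hc with h | h
            · simp [h]
            · have hcast : ((t % n : Nat) : Int) = (n : Int) - 1 := by omega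
              simp [hcast]
        · obtain ⟨_, heq⟩ := pvAddr n G hG ((t / (G * n) : Nat) : Int) ((t % n : Nat) : Int)
            (Int.natCast_nonneg _) (Int.natCast_nonneg _)
          rw [beq_iff_eq, heq, Int.toNat_natCast, Int.toNat_natCast]
          rw [hbeq] at hsum
          omega
  by_cases hc : ((PySem.List.pyRange 0 (n : Int) 1).any
      (fun i => pvHit (n : Int) (G : Int) i t)) = true
  · rw [if_pos hc]
    obtain ⟨h1, h2⟩ := hchar.mp hc
    unfold pvVal pvCell
    have hcond : ((((t / (G * n) : Nat) : Int) == 0 ||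
          ((t / (G * n) : Nat) : Int) == (n : Int) - 1 || ((t % n : Nat) : Int) == 0 ||
          ((t % n : Nat) : Int) == (n : Int) - 1) &&
          (((t % (G * n) / n : Nat) : Int) == (G : Int) - 1) && true) = true := by
      simp only [Bool.and_true, Bool.and_eq_true, Bool.or_eq_true, beq_iff_eq]
      constructor
      · rcases h2 with h | h | h | h
        · exact Or.inl (Or.inl (Or.inl (by omega)))
        · exact Or.inl (Or.inl (Or.inr (by omega)))
        · exact Or.inl (Or.inr (by omega))
        · exact Or.inr (by omega)
      · omega
    rw [if_pos hcond]
    have hcast : ((t % (G * n) / n : Nat) : Int) = (G : Int) - 1 := by omega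
    rw [hcast]
  · rw [if_neg hc]
    unfold pvCell
    have hcond : ((((t / (G * n) : Nat) : Int) == 0 ||
          ((t / (G * n) : Nat) : Int) == (n : Int) - 1 || ((t % n : Nat) : Int) == 0 ||
          ((t % n : Nat) : Int) == (n : Int) - 1) &&
          (((t % (G * n) / n : Nat) : Int) == (G : Int) - 1) && true) = false := by
      cases hcc : ((((t / (G * n) : Nat) : Int) == 0 ||
          ((t / (G * n) : Nat) : Int) == (n : Int) - 1 || ((t % n : Nat) : Int) == 0 ||
          ((t % n : Nat) : Int) == (n : Int) - 1) &&
          (((t % (G * n) / n : Nat) : Int) == (G : Int) - 1) && true) with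
      | false => rfl
      | true =>
        exfalso
        apply hc
        apply hchar.mpr
        simp only [Bool.and_true, Bool.and_eq_true, Bool.or_eq_true, beq_iff_eq] at hcc
        obtain ⟨hdisj, hjeq⟩ := hcc
        constructor
        · omega
        · rcases hdisj with ((h | h) | h) | h
          · exact Or.inl (by omega)
          · exact Or.inr (Or.inl (by omega))
          · exact Or.inr (Or.inr (Or.inl (by omega)))
          · exact Or.inr (Or.inr (Or.inr (by omega)))
    rw [hcond]
    simp

theorem pv_main (sl h_ g : Int) (fence : Bool) :
    build_base_world sl h_ g fence = build_base_world_alt sl h_ g fence := by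
  rcases (by omega : sl ≤ 0 ∨ 0 < sl) with hsl | hsl
  · rw [pvA_canon]
    unfold build_base_world_alt
    simp [PySem.List.pyRange_one_eq_nil hsl]
  obtain ⟨n, rfl⟩ : ∃ n : Nat, sl = (n : Int) := ⟨sl.toNat, (Int.toNat_of_nonneg hsl.le).symm⟩
  have hn : 0 < n := by exact_mod_cast hsl
  rcases (by omega : g ≤ 0 ∨ 0 < g) with hg | hg
  · rw [pvA_canon]
    unfold build_base_world_alt
    have hfg : (fence && decide (0 < g)) = false := by
      simp [not_lt.mpr hg]
    simp [PySem.List.pyRange_one_eq_nil hg, hfg]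
  obtain ⟨G, rfl⟩ : ∃ G : Nat, g = (G : Int) := ⟨g.toNat, (Int.toNat_of_nonneg hg.le).symm⟩
  have hG : 0 < G := by exact_mod_cast hg
  cases fence with
  | false =>
    rw [pvA_canon]
    unfold build_base_world_alt
    simp only [Bool.false_and, Bool.false_eq_true, if_false]
    have hF : ∀ i j k : Int, pvCell (n : Int) (G : Int) false i j k = ((i, j, k), pvWhite) := by
      intro i j k
      simp [pvCell]
    simp only [hF]
  | true =>
    rw [pvA_canon, pvCanonNat n G (fun i j k => pvCell (n : Int) (G : Int) true i j k)]
    simp only [build_base_world_alt]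
    rw [if_pos (by simp [hG] : (true && decide ((0 : Int) < (G : Int))) = true)]
    rw [pvCanonNat n G (fun i j k => ((i, j, k), pvWhite))]
    rw [show (fun (W : List ((Int × Int × Int) × (Int × Int))) (i : Int) =>
          (if i == 0 || i == (n : Int) - 1 then PySem.List.pyRange 0 (n : Int) 1
            else [0, (n : Int) - 1]).foldl
            (fun W k => PySem.List.pySetD W
              (i * (G : Int) * (n : Int) + ((G : Int) - 1) * (n : Int) + k)
              ((i, (G : Int) - 1, k), pvRed)) W)
        = (fun (W : List ((Int × Int × Int) × (Int × Int))) (i : Int) =>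
          (pvKs (n : Int) i).foldl
            (fun W k => PySem.List.pySetD W
              (i * (G : Int) * (n : Int) + ((G : Int) - 1) * (n : Int) + k)
              ((i, (G : Int) - 1, k), pvRed)) W) from rfl]
    rw [pvPatch (n : Int) (G : Int) n G rfl rfl hn hG (PySem.List.pyRange 0 (n : Int) 1)
        (fun i hi => PySem.List.mem_pyRange_one.mp hi) _]
    refine (List.map_congr_left ?_).symm
    intro t ht
    exact pvPoint n G hn hG t (List.mem_range.mp ht)

-- ===== VERDICT (by name: the statement is the Claim_ definition above) =====
theorem build_base_world_spec : Claim_equal_build_base_world := by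
  intro sl h_ g fence _
  exact pv_main sl h_ g fence
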